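-- pv_equiv track=rewrite | github.com/luchanos/for_my_shiny_students | algorythms/hw_1.py | bitovoe_or
-- ===== SOURCE A (Python) =====
-- def to_bin(n):
--     final = 0
--     razr = 0
--     while True:
--         d = n // 2
--         os = n % 2
--         if d == 0 and os == 0:
--             break
--         n = d
--         final = final + 10 ** razr * os
--         razr += 1
--     return final
--
-- def bitovoe_or(n1, n2):
--     bin_n1 = to_bin(n1)
--     bin_n2 = to_bin(n2)
--     res = 0
--     razr = 0
--
--     while bin_n1 != 0 or bin_n2 != 0:
--         a = bin_n1 % 10
--         b = bin_n2 % 10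
--         res += 10 ** razr * int(a == 1 or b == 1)
--         bin_n1 = bin_n1 // 10
--         bin_n2 = bin_n2 // 10
--         razr += 1
--
--     return res
-- ===== SOURCE B (Python) =====
-- def bitovoe_or(n1, n2):
--     r = n1 | n2
--     res = 0
--     p = 1
--     while r != 0:
--         res += p * (r % 2)
--         r //= 2
--         p *= 10
--     return res
-- ===== Notes on version B (the rewrite author's own statement) =====
-- stated objective: simpler
-- what changed: B computes the integer bitwise OR n1|n2 first and then renders it as a binary-digit decimal in one loop, instead of A's two separate binary conversions followed by a digit-wise OR-merging loop; Pre_ restricts to nonnegative inputs because A loops forever on negatives (B does too).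
import Mathlib
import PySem

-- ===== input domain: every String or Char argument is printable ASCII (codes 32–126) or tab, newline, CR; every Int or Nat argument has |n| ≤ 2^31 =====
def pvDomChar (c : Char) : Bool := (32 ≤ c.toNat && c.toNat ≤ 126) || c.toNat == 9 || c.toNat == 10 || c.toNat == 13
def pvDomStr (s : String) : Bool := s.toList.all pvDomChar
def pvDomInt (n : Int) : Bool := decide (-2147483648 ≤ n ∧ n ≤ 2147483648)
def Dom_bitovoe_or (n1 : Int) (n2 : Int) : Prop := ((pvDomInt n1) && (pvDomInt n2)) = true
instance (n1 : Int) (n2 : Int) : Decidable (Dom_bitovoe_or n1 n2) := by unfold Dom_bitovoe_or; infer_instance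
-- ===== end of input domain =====

-- B computes n1|n2 first and renders it as a binary-digit decimal in one loop (simpler decomposition,
-- no speed claim). Equivalence about return values on nonnegative inputs (Pre_); on negative inputs
-- both Pythons loop forever, so the Lean loops carry a fuel parameter that is sufficient on Pre_.

-- ===== PORT A =====
-- while-loop of to_bin, with fuel (sufficient for nonnegative n; Python diverges on negative n)
def toBinLoop : Nat → Int → Int → Nat → Int
  | 0, _, final, _ => final
  | fuel + 1, n, final, razr =>
    let d := PySem.Int.floordiv n 2
    let os := PySem.Int.mod n 2
    if d = 0 ∧ os = 0 then final
    else toBinLoop fuel d (final + 10 ^ razr * os) (razr + 1)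

def toBin (n : Int) : Int := toBinLoop (n.toNat + 1) n 0 0

-- the digit-wise OR-merging while loop of bitovoe_or, with fuel
def orLoop : Nat → Int → Int → Int → Nat → Int
  | 0, _, _, res, _ => res
  | fuel + 1, bin1, bin2, res, razr =>
    if bin1 ≠ 0 ∨ bin2 ≠ 0 then
      let a := PySem.Int.mod bin1 10
      let b := PySem.Int.mod bin2 10
      orLoop fuel (PySem.Int.floordiv bin1 10) (PySem.Int.floordiv bin2 10)
        (res + 10 ^ razr * (if a = 1 ∨ b = 1 then 1 else 0)) (razr + 1)
    else res

def bitovoe_or (n1 : Int) (n2 : Int) : Int :=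
  let bin_n1 := toBin n1
  let bin_n2 := toBin n2
  orLoop (bin_n1.toNat + bin_n2.toNat + 1) bin_n1 bin_n2 0 0

-- ===== PORT B =====
-- B's single while loop, with fuel (sufficient for nonnegative r)
def altLoop : Nat → Int → Int → Int → Int
  | 0, _, res, _ => res
  | fuel + 1, r, res, p =>
    if r ≠ 0 then
      altLoop fuel (PySem.Int.floordiv r 2) (res + p * PySem.Int.mod r 2) (p * 10)
    else res

def bitovoe_or_alt (n1 : Int) (n2 : Int) : Int :=
  let r := PySem.Int.bor n1 n2
  altLoop (r.toNat + 1) r 0 1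

-- ===== PRECONDITION & SPEC =====
-- Pre_ excludes negative inputs: there the Python A (and B) loop forever, returning nothing.
def Pre_bitovoe_or (n1 : Int) (n2 : Int) : Prop := 0 ≤ n1 ∧ 0 ≤ n2
instance (n1 : Int) (n2 : Int) : Decidable (Pre_bitovoe_or n1 n2) := by unfold Pre_bitovoe_or; infer_instance
def pvWitness_bitovoe_or : Int × Int := (12, 10)

def Spec_bitovoe_or (n1 : Int) (n2 : Int) (out : Int) : Prop := out = bitovoe_or_alt n1 n2
instance (n1 : Int) (n2 : Int) (out : Int) : Decidable (Spec_bitovoe_or n1 n2 out) := by unfold Spec_bitovoe_or; infer_instance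

-- ===== CLAIM (what is proved, stated in full; the proofs are below) =====
def Claim_equal_bitovoe_or : Prop := ∀ (n1 : Int) (n2 : Int), Dom_bitovoe_or n1 n2 → Pre_bitovoe_or n1 n2 → Spec_bitovoe_or n1 n2 (bitovoe_or n1 n2)

-- ===== LEMMAS AND PROOFS =====

-- binary-digit-decimal encoding (mathematical reference function)
def bd : Nat → Nat
  | 0 => 0
  | n + 1 => 10 * bd ((n + 1) / 2) + (n + 1) % 2
decreasing_by exact Nat.div_lt_self (Nat.succ_pos n) (by omega)

theorem bd_spec (n : Nat) : bd n = if n = 0 then 0 else 10 * bd (n / 2) + n % 2 := by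
  cases n with
  | zero => simp [bd]
  | succ m => simp [bd]

theorem bd_ge (n : Nat) : n ≤ bd n := by
  induction n using Nat.strong_induction_on with
  | _ n ih =>
    cases n with
    | zero => simp [bd]
    | succ m =>
      have h2 := ih ((m + 1) / 2) (Nat.div_lt_self (Nat.succ_pos m) (by omega))
      simp only [bd]
      omega

theorem lor_div2 (a b : Nat) : (a ||| b) / 2 = a / 2 ||| b / 2 := by
  apply Nat.eq_of_testBit_eq; intro i
  simp [Nat.testBit_div_two]

theorem lor_mod2 (a b : Nat) : (a ||| b) % 2 = if a % 2 = 1 ∨ b % 2 = 1 then 1 else 0 := by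
  have key : (a ||| b) % 2 = 1 ↔ a % 2 = 1 ∨ b % 2 = 1 := by
    have h := Nat.testBit_lor a b 0
    simpa [Nat.testBit_zero] using h
  rcases Nat.mod_two_eq_zero_or_one ((a ||| b)) with h | h <;> simp [h] at key ⊢ <;> omega

theorem lor_ne_zero (a b : Nat) (h : a ≠ 0 ∨ b ≠ 0) : a ||| b ≠ 0 := by
  intro hz
  have ha : a = 0 := Nat.eq_of_testBit_eq fun i => by
    have h2 := congrArg (fun n => n.testBit i) hz
    simp only [Nat.testBit_lor, Nat.zero_testBit, Bool.or_eq_false_iff] at h2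
    simp [h2.1]
  have hb : b = 0 := Nat.eq_of_testBit_eq fun i => by
    have h2 := congrArg (fun n => n.testBit i) hz
    simp only [Nat.testBit_lor, Nat.zero_testBit, Bool.or_eq_false_iff] at h2
    simp [h2.2]
  tauto

theorem bd_mod10 (a : Nat) : bd a % 10 = a % 2 := by
  rw [bd_spec]; split <;> omega

theorem bd_div10 (a : Nat) : bd a / 10 = bd (a / 2) := by
  rw [bd_spec]; split
  · simp_all [bd]
  · omega

theorem two_cast : ((2 : Int)) = ((2 : Nat) : Int) := by norm_num
theorem ten_cast : ((10 : Int)) = ((10 : Nat) : Int) := by norm_num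

theorem toBinLoop_bd (fuel : Nat) (n : Nat) (final : Int) (razr : Nat) (hf : n < fuel) :
    toBinLoop fuel (n : Int) final razr = final + 10 ^ razr * (bd n : Int) := by
  induction fuel generalizing n final razr with
  | zero => omega
  | succ fuel ih =>
    simp only [toBinLoop, two_cast, PySem.Int.floordiv_natCast, PySem.Int.mod_natCast]
    by_cases h0 : n = 0
    · subst h0; simp [bd]
    · rw [if_neg (by
        intro hc
        have hd : n / 2 = 0 := by exact_mod_cast hc.1
        have hm : n % 2 = 0 := by exact_mod_cast hc.2
        omega)]
      rw [ih (n / 2) _ _ (by omega)]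
      rw [show bd n = 10 * bd (n / 2) + n % 2 by rw [bd_spec]; exact if_neg h0]
      push_cast
      ring

theorem toBin_bd (n : Int) (h : 0 ≤ n) : toBin n = (bd n.toNat : Int) := by
  unfold toBin
  rw [show n = ((n.toNat : Nat) : Int) from (Int.toNat_of_nonneg h).symm]
  rw [toBinLoop_bd _ _ _ _ (by simp only [Int.toNat_natCast]; omega)]
  simp
  congr 1
  omega

theorem orLoop_bd (fuel : Nat) (a b : Nat) (res : Int) (razr : Nat) (hf : a + b < fuel) :
    orLoop fuel (bd a : Int) (bd b : Int) res razr = res + 10 ^ razr * (bd (a ||| b) : Int) := by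
  induction fuel generalizing a b res razr with
  | zero => omega
  | succ fuel ih =>
    by_cases h0 : a = 0 ∧ b = 0
    · obtain ⟨ha, hb⟩ := h0; subst ha; subst hb
      simp [orLoop, bd]
    · have hne : a ≠ 0 ∨ b ≠ 0 := by tauto
      have hdpos : 0 < bd a ∨ 0 < bd b := by
        rcases hne with h | h
        · exact Or.inl (Nat.lt_of_lt_of_le (Nat.pos_of_ne_zero h) (bd_ge a))
        · exact Or.inr (Nat.lt_of_lt_of_le (Nat.pos_of_ne_zero h) (bd_ge b))
      simp only [orLoop]
      rw [if_pos (by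
        rcases hdpos with h | h
        · exact Or.inl (by exact_mod_cast Nat.pos_iff_ne_zero.mp h)
        · exact Or.inr (by exact_mod_cast Nat.pos_iff_ne_zero.mp h))]
      rw [show PySem.Int.mod (bd a : Int) 10 = ((a % 2 : Nat) : Int) by
        rw [ten_cast, PySem.Int.mod_natCast, bd_mod10]]
      rw [show PySem.Int.mod (bd b : Int) 10 = ((b % 2 : Nat) : Int) by
        rw [ten_cast, PySem.Int.mod_natCast, bd_mod10]]
      rw [show PySem.Int.floordiv (bd a : Int) 10 = ((bd (a / 2) : Nat) : Int) by
        rw [ten_cast, PySem.Int.floordiv_natCast, bd_div10]]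
      rw [show PySem.Int.floordiv (bd b : Int) 10 = ((bd (b / 2) : Nat) : Int) by
        rw [ten_cast, PySem.Int.floordiv_natCast, bd_div10]]
      rw [ih (a / 2) (b / 2) _ _ (by omega)]
      rw [show ((if ((a % 2 : Nat) : Int) = 1 ∨ ((b % 2 : Nat) : Int) = 1 then (1 : Int) else 0))
          = (((a ||| b) % 2 : Nat) : Int) by
        rw [lor_mod2]
        rcases Nat.mod_two_eq_zero_or_one a with h1 | h1 <;>
          rcases Nat.mod_two_eq_zero_or_one b with h2 | h2 <;> simp [h1, h2]]
      rw [show bd (a ||| b) = 10 * bd ((a ||| b) / 2) + (a ||| b) % 2 by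
        rw [bd_spec, if_neg (lor_ne_zero a b hne)]]
      rw [lor_div2]
      push_cast
      ring

theorem altLoop_bd (fuel : Nat) (r : Nat) (res p : Int) (hf : r < fuel) :
    altLoop fuel (r : Int) res p = res + p * (bd r : Int) := by
  induction fuel generalizing r res p with
  | zero => omega
  | succ fuel ih =>
    by_cases h0 : r = 0
    · subst h0; simp [altLoop, bd]
    · simp only [altLoop, two_cast, PySem.Int.floordiv_natCast, PySem.Int.mod_natCast]
      rw [if_pos (by exact_mod_cast h0)]
      rw [ih (r / 2) _ _ (by omega)]
      rw [show bd r = 10 * bd (r / 2) + r % 2 by rw [bd_spec, if_neg h0]]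
      push_cast
      ring

-- ===== VERDICT (by name: the statement is the Claim_ definition above) =====
theorem bitovoe_or_spec : Claim_equal_bitovoe_or := by
  intro n1 n2 _ hpre
  obtain ⟨h1, h2⟩ := hpre
  show bitovoe_or n1 n2 = bitovoe_or_alt n1 n2
  unfold bitovoe_or bitovoe_or_alt
  rw [toBin_bd n1 h1, toBin_bd n2 h2]
  rw [PySem.Int.bor_of_nonneg h1 h2]
  rw [orLoop_bd _ _ _ _ _ (by
    have ha := bd_ge n1.toNat; have hb := bd_ge n2.toNat
    simp only [Int.toNat_natCast]; omega)]
  rw [altLoop_bd _ _ _ _ (by simp only [Int.toNat_natCast]; omega)]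
  simp
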